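-- pv_equiv track=rewrite | github.com/UCI-Networking-Group/FromVoiceToAds | AdsDatasetStatisticalAnalysis/conduct_stats.py | persona_data_pack
-- ===== SOURCE A (Python) =====
-- def persona_data_pack(lst):
--     data = {}
--     for e in lst:
--         persona = e[0]
--         cat = e[1]
--         if persona not in data:
--             data[persona] = {}
--         if cat not in data[persona]:
--             data[persona][cat] = 0
--         data[persona][cat] += 1
--     return data
-- ===== SOURCE B (Python) =====
-- def persona_data_pack(lst):
--     # Phase 1: flat count of (persona, category) pairs, first-occurrence order.
--     counts = {}
--     for e in lst:
--         key = (e[0], e[1])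
--         counts[key] = counts.get(key, 0) + 1
--     # Phase 2: regroup the flat counts into the nested dict.
--     data = {}
--     for (persona, cat), count in counts.items():
--         if persona not in data:
--             data[persona] = {}
--         data[persona][cat] = count
--     return data
-- ===== Notes on version B (the rewrite author's own statement) =====
-- stated objective: alternative
-- what changed: Replaces A's per-element nested dict increment with a two-phase structure: one pass builds a flat counter keyed by the (persona, category) pair, a second pass regroups the counted pairs into the nested dict.
import Mathlib
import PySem

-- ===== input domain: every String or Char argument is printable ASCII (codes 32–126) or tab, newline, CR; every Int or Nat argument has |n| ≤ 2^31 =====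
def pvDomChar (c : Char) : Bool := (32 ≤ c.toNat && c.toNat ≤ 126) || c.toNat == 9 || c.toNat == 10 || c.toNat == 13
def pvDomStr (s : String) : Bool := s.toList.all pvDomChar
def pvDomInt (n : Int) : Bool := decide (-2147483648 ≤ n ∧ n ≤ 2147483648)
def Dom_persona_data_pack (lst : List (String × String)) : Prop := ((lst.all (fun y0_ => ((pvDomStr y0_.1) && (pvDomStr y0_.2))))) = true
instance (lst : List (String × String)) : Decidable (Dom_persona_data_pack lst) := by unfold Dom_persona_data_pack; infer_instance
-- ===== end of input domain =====

-- B replaces A's per-element nested increment with a two-phase count-then-regroup decomposition (same cost, different structure).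

-- ===== PORT A =====
-- one loop: nested dict, inner dict created on first sight, cell initialised to 0 then incremented
def persona_data_pack (lst : List (String × String)) : List (String × List (String × Int)) :=
  (lst.foldl (fun data e =>
      let persona := e.1
      let cat := e.2
      let data := if data.contains persona then data else data.insert persona PySem.Dict.empty
      let inner := data.getD persona PySem.Dict.empty
      let inner := if inner.contains cat then inner else inner.insert cat 0
      let inner := inner.insert cat (inner.getD cat 0 + 1)
      data.insert persona inner) PySem.Dict.empty).items.map (fun p => (p.1, p.2.items))

-- ===== PORT B =====
-- phase 1: flat counter keyed by the (persona, cat) pair; phase 2: regroup its items into the nested dict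
def persona_data_pack_alt (lst : List (String × String)) : List (String × List (String × Int)) :=
  (((lst.foldl (fun c e => c.insert (e.1, e.2) (c.getD (e.1, e.2) 0 + 1)) PySem.Dict.empty).items).foldl
    (fun data x =>
      let persona := x.1.1
      let cat := x.1.2
      let count := x.2
      let data := if data.contains persona then data else data.insert persona PySem.Dict.empty
      data.insert persona ((data.getD persona PySem.Dict.empty).insert cat count))
    PySem.Dict.empty).items.map (fun p => (p.1, p.2.items))

-- ===== PRECONDITION & SPEC =====
def Spec_persona_data_pack (lst : List (String × String)) (out : List (String × List (String × Int))) : Prop := out = persona_data_pack_alt lst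
instance (lst : List (String × String)) (out : List (String × List (String × Int))) : Decidable (Spec_persona_data_pack lst out) := by unfold Spec_persona_data_pack; infer_instance

-- ===== CLAIM (what is proved, stated in full; the proofs are below) =====
def Claim_equal_persona_data_pack : Prop := ∀ (lst : List (String × String)), Dom_persona_data_pack lst → Spec_persona_data_pack lst (persona_data_pack lst)

-- ===== LEMMAS AND PROOFS =====

def gstep (data : PySem.Dict String (PySem.Dict String Int)) (x : (String × String) × Int) :
    PySem.Dict String (PySem.Dict String Int) :=
  let d1 := if data.contains x.1.1 then data else data.insert x.1.1 PySem.Dict.empty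
  d1.insert x.1.1 ((d1.getD x.1.1 PySem.Dict.empty).insert x.1.2 ((d1.getD x.1.1 PySem.Dict.empty).getD x.1.2 0 + x.2))
def bstep (data : PySem.Dict String (PySem.Dict String Int)) (x : (String × String) × Int) :
    PySem.Dict String (PySem.Dict String Int) :=
  let d1 := if data.contains x.1.1 then data else data.insert x.1.1 PySem.Dict.empty
  d1.insert x.1.1 ((d1.getD x.1.1 PySem.Dict.empty).insert x.1.2 x.2)

def pKeys (q : List ((String × String) × Int)) : List String :=
  PySem.List.dedup (q.map (fun x => x.1.1))
def pCats (q : List ((String × String) × Int)) (p : String) : List String :=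
  PySem.List.dedup ((q.filter (fun x => x.1.1 == p)).map (fun x => x.1.2))
def pCnt (q : List ((String × String) × Int)) (p c : String) : Int :=
  ((q.filter (fun x => x.1 == (p, c))).map (fun x => x.2)).sum
def pInner (q : List ((String × String) × Int)) (p : String) : List (String × Int) :=
  (pCats q p).map (fun c => (c, pCnt q p c))
def Tgt (q : List ((String × String) × Int)) : List (String × List (String × Int)) :=
  (pKeys q).map (fun p => (p, pInner q p))
def TgtD (q : List ((String × String) × Int)) : PySem.Dict String (PySem.Dict String Int) :=
  PySem.Dict.mk ((Tgt q).map (fun r => (r.1, PySem.Dict.mk r.2)))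

lemma dedup_append_singleton {α : Type} [BEq α] [LawfulBEq α] (l : List α) (a : α) :
    PySem.List.dedup (l ++ [a]) = if a ∈ l then PySem.List.dedup l else PySem.List.dedup l ++ [a] := by
  simp only [PySem.List.dedup_eq_ofList, PySem.Set.ofList_append, PySem.Set.update_cons,
    PySem.Set.update_nil, PySem.Set.add, PySem.Set.contains_eq_listContains, List.contains_eq_mem,
    PySem.Set.mem_ofList, decide_eq_true_eq]

lemma filter_dedup {α : Type} [BEq α] [LawfulBEq α] (l : List α) (p : α → Bool) :
    (PySem.List.dedup l).filter p = PySem.List.dedup (l.filter p) := by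
  induction l using List.reverseRecOn with
  | nil => rfl
  | append_singleton l a ih =>
    simp only [PySem.List.dedup_eq_ofList] at ih
    rw [dedup_append_singleton, List.filter_append]
    by_cases hp : p a
    · simp only [hp, List.filter_cons, List.filter_nil, if_true]
      rw [dedup_append_singleton]
      by_cases hm : a ∈ l
      · simp [hm, List.mem_filter.mpr ⟨hm, hp⟩, ih]

      · have : a ∉ l.filter p := fun hc => hm (List.mem_filter.mp hc).1
        simp [hm, this, ih, List.filter_append, hp]
    · by_cases hm : a ∈ l <;>
        simp [hp, hm, ih, List.filter_append, dedup_append_singleton, List.filter_cons]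
lemma dedup_map_dedup {α β : Type} [BEq α] [LawfulBEq α] [BEq β] [LawfulBEq β] (l : List α) (f : α → β) :
    PySem.List.dedup ((PySem.List.dedup l).map f) = PySem.List.dedup (l.map f) := by
  induction l using List.reverseRecOn with
  | nil => rfl
  | append_singleton l a ih =>
    simp only [PySem.List.dedup_eq_ofList] at ih
    rw [dedup_append_singleton]
    by_cases hm : a ∈ l
    · have : f a ∈ l.map f := List.mem_map_of_mem hm
      rw [List.map_append]
      simp only [hm, if_true, List.map_cons, List.map_nil]
      rw [dedup_append_singleton]
      simp [this, ih]
    · simp only [hm, if_false, List.map_append, List.map_cons, List.map_nil]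
      rw [dedup_append_singleton, dedup_append_singleton]
      have hmem : f a ∈ (PySem.List.dedup l).map f ↔ f a ∈ l.map f := by
        simp [List.mem_map, PySem.List.mem_dedup]
      by_cases h2 : f a ∈ l.map f
      · simp only [PySem.List.dedup_eq_ofList] at hmem
        simp only [PySem.List.dedup_eq_ofList]
        rw [if_pos (hmem.mpr h2), if_pos h2]
        exact ih
      · have h3 : f a ∉ List.map f (PySem.Set.ofList l) := by
          simp only [PySem.List.dedup_eq_ofList] at hmem
          exact fun hc => h2 (hmem.mp hc)
        simp only [PySem.List.dedup_eq_ofList]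
        rw [if_neg h3, if_neg h2, ih]

lemma keys_TgtD (q : List ((String × String) × Int)) : (TgtD q).keys = pKeys q := by
  simp [TgtD, Tgt, PySem.Dict.keys, List.map_map, Function.comp_def]

lemma nodup_keys_TgtD (q : List ((String × String) × Int)) : (TgtD q).keys.Nodup := by
  rw [keys_TgtD]
  simpa [pKeys] using PySem.List.nodup_dedup (q.map (fun x => x.1.1))

lemma contains_TgtD (q : List ((String × String) × Int)) (p : String) :
    (TgtD q).contains p = decide (p ∈ pKeys q) := by
  rw [PySem.Dict.contains_eq_decide_mem_keys, keys_TgtD]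

lemma getD_TgtD (q : List ((String × String) × Int)) (p : String) (h : p ∈ pKeys q) :
    (TgtD q).getD p PySem.Dict.empty = PySem.Dict.mk (pInner q p) := by
  refine PySem.Dict.getD_of_mem_items _ ?_ (nodup_keys_TgtD q) _
  show (p, PySem.Dict.mk (pInner q p)) ∈ (Tgt q).map (fun r => (r.1, PySem.Dict.mk r.2))
  exact List.mem_map_of_mem (List.mem_map_of_mem h)

lemma pKeys_append (q : List ((String × String) × Int)) (x : (String × String) × Int) :
    pKeys (q ++ [x]) = if x.1.1 ∈ q.map (fun y => y.1.1) then pKeys q else pKeys q ++ [x.1.1] := by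
  simp only [pKeys, List.map_append, List.map_cons, List.map_nil]
  exact dedup_append_singleton _ _

lemma pCats_append_ne (q : List ((String × String) × Int)) (x : (String × String) × Int)
    (p : String) (h : x.1.1 ≠ p) : pCats (q ++ [x]) p = pCats q p := by
  simp [pCats, List.filter_append, List.filter_cons, h]

lemma pCnt_append_ne (q : List ((String × String) × Int)) (x : (String × String) × Int)
    (p c : String) (h : x.1 ≠ (p, c)) : pCnt (q ++ [x]) p c = pCnt q p c := by
  simp [pCnt, List.filter_append, List.filter_cons, h]

lemma pCats_append_self (q : List ((String × String) × Int)) (x : (String × String) × Int) :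
    pCats (q ++ [x]) x.1.1
      = if x.1.2 ∈ pCats q x.1.1 then pCats q x.1.1 else pCats q x.1.1 ++ [x.1.2] := by
  simp only [pCats, List.filter_append, List.filter_cons, beq_self_eq_true, if_true,
    List.filter_nil, List.map_append, List.map_cons, List.map_nil]
  rw [dedup_append_singleton]
  simp only [pCats, PySem.List.dedup_eq_ofList, PySem.Set.mem_ofList]

lemma pCnt_append_self (q : List ((String × String) × Int)) (x : (String × String) × Int) :
    pCnt (q ++ [x]) x.1.1 x.1.2 = pCnt q x.1.1 x.1.2 + x.2 := by
  simp [pCnt, List.filter_append, List.filter_cons]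

lemma pCnt_eq_zero_of_not_mem (q : List ((String × String) × Int)) (p c : String)
    (h : c ∉ pCats q p) : pCnt q p c = 0 := by
  have : q.filter (fun x => x.1 == (p, c)) = [] := by
    rw [List.filter_eq_nil_iff]
    intro y hy hc
    apply h
    have hy1 : y.1 = (p, c) := by simpa using hc
    simp only [pCats, PySem.List.mem_dedup]
    refine List.mem_map.mpr ⟨y, List.mem_filter.mpr ⟨hy, by simp [hy1]⟩, by simp [hy1]⟩
  simp [pCnt, this]

lemma mk_pInner_insert_self (q : List ((String × String) × Int)) (x : (String × String) × Int) :
    (PySem.Dict.mk (pInner q x.1.1)).insert x.1.2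
        ((PySem.Dict.mk (pInner q x.1.1)).getD x.1.2 0 + x.2)
      = PySem.Dict.mk (pInner (q ++ [x]) x.1.1) := by
  have hkeys : (PySem.Dict.mk (pInner q x.1.1)).keys = pCats q x.1.1 := by
    simp [PySem.Dict.keys, pInner, List.map_map, Function.comp_def]
  have hnd : (PySem.Dict.mk (pInner q x.1.1)).keys.Nodup := by
    rw [hkeys]
    simpa [pCats] using PySem.List.nodup_dedup _
  apply PySem.Dict.ext
  by_cases hc : x.1.2 ∈ pCats q x.1.1
  · have hcontains : (PySem.Dict.mk (pInner q x.1.1)).contains x.1.2 = true := by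
      rw [PySem.Dict.contains_eq_decide_mem_keys, hkeys]; simpa using hc
    have hget : (PySem.Dict.mk (pInner q x.1.1)).getD x.1.2 0 = pCnt q x.1.1 x.1.2 := by
      refine PySem.Dict.getD_of_mem_items _ ?_ hnd _
      show (x.1.2, pCnt q x.1.1 x.1.2) ∈ (pCats q x.1.1).map (fun c => (c, pCnt q x.1.1 c))
      exact List.mem_map_of_mem hc
    rw [PySem.Dict.items_insert_of_contains _ _ hcontains, hget]
    show (pInner q x.1.1).map _ = pInner (q ++ [x]) x.1.1
    simp only [pInner, pCats_append_self, hc, if_true, List.map_map]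
    apply List.map_congr_left
    intro c hcm
    by_cases hce : c = x.1.2
    · subst hce
      simp [pCnt_append_self]
    · have : (c == x.1.2) = false := by simpa using hce
      simp only [Function.comp_def, this, Bool.false_eq_true, if_false]
      rw [pCnt_append_ne]
      intro hx1
      exact hce (congrArg Prod.snd hx1).symm
  · have hcontains : (PySem.Dict.mk (pInner q x.1.1)).contains x.1.2 = false := by
      rw [PySem.Dict.contains_eq_decide_mem_keys, hkeys]; simpa using hc
    have hget : (PySem.Dict.mk (pInner q x.1.1)).getD x.1.2 0 = 0 :=
      PySem.Dict.getD_of_not_contains _ _ hcontains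
    rw [PySem.Dict.items_insert_of_not_contains _ _ hcontains, hget]
    show pInner q x.1.1 ++ [(x.1.2, 0 + x.2)] = pInner (q ++ [x]) x.1.1
    have hzero : pCnt q x.1.1 x.1.2 = 0 := pCnt_eq_zero_of_not_mem _ _ _ hc
    simp only [pInner, pCats_append_self, hc, if_false, List.map_append, List.map_cons, List.map_nil]
    congr 1
    · apply List.map_congr_left
      intro c hcm
      have hce : c ≠ x.1.2 := fun h => hc (h ▸ hcm)
      rw [pCnt_append_ne]
      intro hx1
      exact hce (congrArg Prod.snd hx1).symm
    · rw [pCnt_append_self, hzero]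

lemma gstep_TgtD (q : List ((String × String) × Int)) (x : (String × String) × Int) :
    gstep (TgtD q) x = TgtD (q ++ [x]) := by
  unfold gstep
  simp only []
  by_cases hP : x.1.1 ∈ q.map (fun y => y.1.1)
  · have hPk : x.1.1 ∈ pKeys q := by
      simpa [pKeys, PySem.List.dedup_eq_ofList, PySem.Set.mem_ofList] using hP
    have hcontains : (TgtD q).contains x.1.1 = true := by
      rw [contains_TgtD]; simpa using hPk
    rw [if_pos hcontains, getD_TgtD q x.1.1 hPk, mk_pInner_insert_self]
    apply PySem.Dict.ext
    rw [PySem.Dict.items_insert_of_contains _ _ hcontains]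
    show ((Tgt q).map (fun r => (r.1, PySem.Dict.mk r.2))).map _
        = (Tgt (q ++ [x])).map (fun r => (r.1, PySem.Dict.mk r.2))
    have hkeys' : pKeys (q ++ [x]) = pKeys q := by
      rw [pKeys_append, if_pos hP]
    simp only [Tgt, hkeys', List.map_map]
    apply List.map_congr_left
    intro p hpm
    by_cases hpe : p = x.1.1
    · subst hpe
      simp
    · have hbe : (p == x.1.1) = false := by simpa using hpe
      simp only [Function.comp_def, hbe, Bool.false_eq_true, if_false]
      have h1 : pInner (q ++ [x]) p = pInner q p := by
        simp only [pInner, pCats_append_ne q x p (fun h => hpe (h.symm))]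
        apply List.map_congr_left
        intro c _
        rw [pCnt_append_ne]
        intro hx1
        exact hpe ((congrArg Prod.fst hx1).symm ▸ rfl)
      rw [h1]
  · have hPk : x.1.1 ∉ pKeys q := by
      simpa [pKeys, PySem.List.dedup_eq_ofList, PySem.Set.mem_ofList] using hP
    have hcontains : (TgtD q).contains x.1.1 = false := by
      rw [contains_TgtD]; simpa using hPk
    rw [if_neg (by simp [hcontains]), PySem.Dict.getD_insert_self, PySem.Dict.insert_insert_self]
    apply PySem.Dict.ext
    rw [PySem.Dict.items_insert_of_not_contains _ _ hcontains]
    show ((Tgt q).map (fun r => (r.1, PySem.Dict.mk r.2))) ++ [(x.1.1, _)]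
        = (Tgt (q ++ [x])).map (fun r => (r.1, PySem.Dict.mk r.2))
    have hkeys' : pKeys (q ++ [x]) = pKeys q ++ [x.1.1] := by
      rw [pKeys_append, if_neg hP]
    simp only [Tgt, hkeys', List.map_append, List.map_cons, List.map_nil, List.map_map]
    congr 1
    · apply List.map_congr_left
      intro p hpm
      have hpe : p ≠ x.1.1 := fun h => hP (h ▸ (by simpa [pKeys, PySem.List.dedup_eq_ofList, PySem.Set.mem_ofList] using hpm))
      have h1 : pInner (q ++ [x]) p = pInner q p := by
        simp only [pInner, pCats_append_ne q x p (fun h => hpe (h.symm))]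
        apply List.map_congr_left
        intro c _
        rw [pCnt_append_ne]
        intro hx1
        exact hpe ((congrArg Prod.fst hx1).symm ▸ rfl)
      simp only [Function.comp_def, h1]
    · -- fresh persona: inner is a single cell
      have hcats : pCats (q ++ [x]) x.1.1 = [x.1.2] := by
        rw [pCats_append_self]
        have hempty : pCats q x.1.1 = [] := by
          have : q.filter (fun y => y.1.1 == x.1.1) = [] := by
            rw [List.filter_eq_nil_iff]
            intro y hy hc
            exact hP (List.mem_map.mpr ⟨y, hy, by simpa using hc⟩)
          simp [pCats, this]
        simp [hempty]
      have hcnt : pCnt (q ++ [x]) x.1.1 x.1.2 = 0 + x.2 := by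
        rw [pCnt_append_self]
        have : pCnt q x.1.1 x.1.2 = 0 := by
          apply pCnt_eq_zero_of_not_mem
          intro hc
          simp only [pCats, PySem.List.dedup_eq_ofList, PySem.Set.mem_ofList] at hc
          obtain ⟨y, hy, _⟩ := List.mem_map.mp hc
          exact hP (List.mem_map.mpr ⟨y, (List.mem_filter.mp hy).1, by
            simpa using (List.mem_filter.mp hy).2⟩)
        rw [this]
      simp only [pInner, hcats, List.map_cons, List.map_nil, hcnt]
      rfl

lemma foldl_gstep_eq_TgtD (q : List ((String × String) × Int)) :
    q.foldl gstep PySem.Dict.empty = TgtD q := by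
  induction q using List.reverseRecOn with
  | nil => rfl
  | append_singleton q x ih => rw [List.foldl_append, List.foldl_cons, List.foldl_nil, ih, gstep_TgtD]

lemma dedup_replicate_succ {α : Type} [BEq α] [LawfulBEq α] (n : Nat) (a : α) :
    PySem.List.dedup (List.replicate (n + 1) a) = [a] := by
  induction n with
  | zero => rfl
  | succ n ih =>
    rw [List.replicate_succ', dedup_append_singleton, if_pos (by simp), ih]

lemma sum_map_snd_map_one (l : List (String × String)) :
    ((l.map (fun e => (e, (1 : Int)))).map (fun x => x.2)).sum = (l.length : Int) := by
  induction l with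
  | nil => rfl
  | cons e l ih =>
    simp only [List.map_cons, List.sum_cons, ih, List.length_cons]
    push_cast
    ring

lemma TgtA_eq_TgtB (lst : List (String × String)) :
    Tgt (lst.map (fun e => (e, (1 : Int)))) =
    Tgt ((PySem.List.dedup lst).map (fun k => (k, (List.count k lst : Int)))) := by
  have hkeys : pKeys (lst.map (fun e => (e, (1 : Int))))
      = pKeys ((PySem.List.dedup lst).map (fun k => (k, (List.count k lst : Int)))) := by
    simp only [pKeys, List.map_map, Function.comp_def]
    exact (dedup_map_dedup lst (fun e => e.1)).symm
  unfold Tgt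
  rw [← hkeys]
  apply List.map_congr_left
  intro p hp
  have hcats : pCats (lst.map (fun e => (e, (1 : Int)))) p
      = pCats ((PySem.List.dedup lst).map (fun k => (k, (List.count k lst : Int)))) p := by
    simp only [pCats, List.filter_map, List.map_map, Function.comp_def]
    rw [filter_dedup, dedup_map_dedup]
  have hcnt : ∀ c ∈ pCats (lst.map (fun e => (e, (1 : Int)))) p,
      pCnt (lst.map (fun e => (e, (1 : Int)))) p c
        = pCnt ((PySem.List.dedup lst).map (fun k => (k, (List.count k lst : Int)))) p c := by
    intro c hcm
    have hmem : (p, c) ∈ lst := by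
      simp only [pCats, PySem.List.dedup_eq_ofList, PySem.Set.mem_ofList, List.filter_map,
        List.map_map, Function.comp_def, List.mem_map, List.mem_filter] at hcm
      obtain ⟨e, ⟨he, hpe⟩, hce⟩ := hcm
      have : e = (p, c) := Prod.ext (by simpa using hpe) hce
      exact this ▸ he
    -- A side: sum of ones over the filtered list = count
    have hA : pCnt (lst.map (fun e => (e, (1 : Int)))) p c = (lst.count (p, c) : Int) := by
      simp only [pCnt, List.filter_map, Function.comp_def]
      have hfilter : (fun (e : String × String) => (e, (1 : Int)).1 == (p, c)) = (fun e => e == (p, c)) := rfl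
      rw [hfilter]
      have := sum_map_snd_map_one (lst.filter (fun e => e == (p, c)))
      simp only [List.map_map] at this ⊢
      rw [this, List.count_eq_length_filter]
    -- B side: the dedup filter is the singleton [(p, c)]
    have hB : pCnt ((PySem.List.dedup lst).map (fun k => (k, (List.count k lst : Int)))) p c
        = (lst.count (p, c) : Int) := by
      simp only [pCnt, List.filter_map, Function.comp_def]
      have hfilter : (fun (k : String × String) => (k, (List.count k lst : Int)).1 == (p, c))
          = (fun k => k == (p, c)) := rfl
      rw [hfilter, filter_dedup, List.filter_beq]
      obtain ⟨n, hn⟩ : ∃ n, lst.count (p, c) = n + 1 :=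
        ⟨lst.count (p, c) - 1, by have := List.count_pos_iff.mpr hmem; omega⟩
      rw [hn, dedup_replicate_succ]
      simp [hn]
    rw [hA, hB]
  have : pInner (lst.map (fun e => (e, (1 : Int)))) p
      = pInner ((PySem.List.dedup lst).map (fun k => (k, (List.count k lst : Int)))) p := by
    unfold pInner
    rw [← hcats]
    apply List.map_congr_left
    intro c hcm
    rw [hcnt c hcm]
  rw [this]

lemma astep_eq_gstep (data : PySem.Dict String (PySem.Dict String Int)) (e : String × String) :
    (let persona := e.1
     let cat := e.2
     let data := if data.contains persona then data else data.insert persona PySem.Dict.empty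
     let inner := data.getD persona PySem.Dict.empty
     let inner := if inner.contains cat then inner else inner.insert cat 0
     let inner := inner.insert cat (inner.getD cat 0 + 1)
     data.insert persona inner) = gstep data (e, 1) := by
  unfold gstep
  simp only []
  set d1 := if data.contains e.1 then data else data.insert e.1 PySem.Dict.empty with hd1
  set inner := d1.getD e.1 PySem.Dict.empty with hi
  by_cases h : inner.contains e.2
  · simp [h]
  · simp only [h, if_false, Bool.false_eq_true]
    rw [PySem.Dict.getD_insert_self, PySem.Dict.insert_insert_self,
        PySem.Dict.getD_of_not_contains _ _ (by simpa using h)]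

lemma foldl_bstep_eq_gstep (q : List ((String × String) × Int))
    (d : PySem.Dict String (PySem.Dict String Int))
    (hfresh : ∀ x ∈ q, ((d.getD x.1.1 PySem.Dict.empty).contains x.1.2) = false)
    (hnd : (q.map (fun x => x.1)).Nodup) :
    q.foldl bstep d = q.foldl gstep d := by
  induction q generalizing d with
  | nil => rfl
  | cons x q ih =>
    simp only [List.foldl_cons]
    have hx : ((d.getD x.1.1 PySem.Dict.empty).contains x.1.2) = false :=
      hfresh x (List.mem_cons_self ..)
    -- the two steps agree on x
    have hstep : bstep d x = gstep d x := by
      unfold bstep gstep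
      simp only []
      have hin : (if d.contains x.1.1 then d else d.insert x.1.1 PySem.Dict.empty).getD x.1.1 PySem.Dict.empty
          = d.getD x.1.1 PySem.Dict.empty := by
        by_cases h : d.contains x.1.1
        · simp [h]
        · simp only [h, if_false, Bool.false_eq_true, PySem.Dict.getD_insert_self]
          rw [PySem.Dict.getD_of_not_contains _ _ (by simpa using h)]
      rw [hin, PySem.Dict.getD_of_not_contains _ _ hx, Int.zero_add]
    rw [hstep]
    apply ih
    · intro y hy
      have hyx : y.1 ≠ x.1 := by
        intro hcon
        simp only [List.map_cons, List.nodup_cons] at hnd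
        exact hnd.1 (hcon ▸ List.mem_map_of_mem hy)
      have hfy := hfresh y (List.mem_cons_of_mem _ hy)
      obtain ⟨⟨xp, xc⟩, xv⟩ := x
      obtain ⟨⟨yp, yc⟩, yv⟩ := y
      simp only at hyx hfy hx ⊢
      unfold gstep
      simp only []
      by_cases hp : yp = xp
      · subst hp
        have hc : yc ≠ xc := by
          intro hcc; exact hyx (by rw [hcc])
        by_cases h : d.contains yp
        · simp only [h, if_true]
          rw [PySem.Dict.getD_insert_self, PySem.Dict.contains_insert]
          simp [hc, hfy]
        · simp only [h, if_false, Bool.false_eq_true]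
          rw [PySem.Dict.getD_insert_self, PySem.Dict.getD_insert_self,
              PySem.Dict.contains_insert]
          simp [hc]
      · by_cases h : d.contains xp
        · simp only [h, if_true]
          rw [PySem.Dict.getD_insert_of_ne _ _ _ hp]
          exact hfy
        · simp only [h, if_false, Bool.false_eq_true]
          rw [PySem.Dict.getD_insert_of_ne _ _ _ hp, PySem.Dict.getD_insert_of_ne _ _ _ hp]
          exact hfy
    · simp only [List.map_cons, List.nodup_cons] at hnd
      exact hnd.2

lemma Tgt_items (q : List ((String × String) × Int)) :
    (TgtD q).items.map (fun p => (p.1, p.2.items)) = Tgt q := by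
  unfold TgtD
  show List.map _ (List.map _ _) = _
  rw [List.map_map]
  have h : ((fun (p : String × PySem.Dict String Int) => (p.1, p.2.items)) ∘
      fun (r : String × List (String × Int)) => (r.1, PySem.Dict.mk r.2)) = id := funext fun r => rfl
  rw [h, List.map_id]

lemma persona_eq (lst : List (String × String)) : persona_data_pack lst = persona_data_pack_alt lst := by
  have hA : lst.foldl (fun data e =>
      let persona := e.1
      let cat := e.2
      let data := if data.contains persona then data else data.insert persona PySem.Dict.empty
      let inner := data.getD persona PySem.Dict.empty
      let inner := if inner.contains cat then inner else inner.insert cat 0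
      let inner := inner.insert cat (inner.getD cat 0 + 1)
      data.insert persona inner) PySem.Dict.empty
      = (lst.map (fun e => (e, (1:Int)))).foldl gstep PySem.Dict.empty := by
    rw [List.foldl_map]
    have h : (fun (data : PySem.Dict String (PySem.Dict String Int)) (e : String × String) =>
      let persona := e.1
      let cat := e.2
      let data := if data.contains persona then data else data.insert persona PySem.Dict.empty
      let inner := data.getD persona PySem.Dict.empty
      let inner := if inner.contains cat then inner else inner.insert cat 0
      let inner := inner.insert cat (inner.getD cat 0 + 1)
      data.insert persona inner) = (fun d e => gstep d (e, 1)) := by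
      funext d e; exact astep_eq_gstep d e
    rw [h]
  have hB : lst.foldl (fun c e => c.insert (e.1, e.2) (c.getD (e.1, e.2) 0 + 1)) PySem.Dict.empty
      = PySem.Dict.counter lst := by
    simpa using PySem.Dict.foldl_insert_getD_add_one_eq_counter lst
  have hfold : ((PySem.Set.ofList lst).map (fun k => (k, (List.count k lst : Int)))).foldl bstep PySem.Dict.empty
      = ((PySem.Set.ofList lst).map (fun k => (k, (List.count k lst : Int)))).foldl gstep PySem.Dict.empty := by
    apply foldl_bstep_eq_gstep
    · intro x _; simp [PySem.Dict.getD_empty, PySem.Dict.contains_empty]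
    · simp only [List.map_map]
      have h : ((fun (x : (String × String) × Int) => x.1) ∘ fun k => (k, (List.count k lst : Int))) = id := by
        funext k; rfl
      rw [h, List.map_id]
      simpa using PySem.List.nodup_dedup lst
  have e1 : persona_data_pack lst = Tgt (lst.map (fun e => (e, (1:Int)))) := by
    have e0 : persona_data_pack lst = ((lst.foldl (fun data e =>
      let persona := e.1
      let cat := e.2
      let data := if data.contains persona then data else data.insert persona PySem.Dict.empty
      let inner := data.getD persona PySem.Dict.empty
      let inner := if inner.contains cat then inner else inner.insert cat 0
      let inner := inner.insert cat (inner.getD cat 0 + 1)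
      data.insert persona inner) PySem.Dict.empty).items).map (fun p => (p.1, p.2.items)) := rfl
    rw [e0, hA, foldl_gstep_eq_TgtD, Tgt_items]
  have e2 : persona_data_pack_alt lst
      = Tgt ((PySem.List.dedup lst).map (fun k => (k, (List.count k lst : Int)))) := by
    have e0 : persona_data_pack_alt lst = (((lst.foldl (fun c e => c.insert (e.1, e.2) (c.getD (e.1, e.2) 0 + 1)) PySem.Dict.empty).items.foldl
        bstep PySem.Dict.empty).items).map (fun p => (p.1, p.2.items)) := rfl
    rw [e0, hB, PySem.Dict.items_counter, hfold, foldl_gstep_eq_TgtD, Tgt_items]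
    simp [PySem.List.dedup_eq_ofList]
  rw [e1, e2, TgtA_eq_TgtB]


-- ===== VERDICT (by name: the statement is the Claim_ definition above) =====
theorem persona_data_pack_spec : Claim_equal_persona_data_pack := by
  intro lst _
  unfold Spec_persona_data_pack
  exact persona_eq lst
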